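-- pv_equiv track=rewrite | github.com/Lethargy/test | 1880-check-if-word-equals-summation-of-two-words.py | isSumEqual
-- ===== SOURCE A (Python) =====
-- def isSumEqual(firstWord: str, secondWord: str, targetWord: str) -> bool:
--     def value(s):
--         out = 0
--         for ch in s:
--             out *= 10
--             out += ord(ch) - ord('a')
--         return out
--
--     return value(firstWord) + value(secondWord) == value(targetWord)
-- ===== SOURCE B (Python) =====
-- def isSumEqual(firstWord: str, secondWord: str, targetWord: str) -> bool:
--     def value(s):
--         n = len(s)
--         if n == 0:
--             return 0
--         if n == 1:
--             return ord(s) - ord('a')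
--         k = n // 2
--         return value(s[:k]) * 10 ** (n - k) + value(s[k:])
--
--     return value(firstWord) + value(secondWord) == value(targetWord)
-- ===== Notes on version B (the rewrite author's own statement) =====
-- stated objective: faster
-- what changed: value(s) is built by divide and conquer (value(s) = value(s[:k])*10**(n-k) + value(s[k:]) with k = n//2) instead of A's left-to-right Horner loop, so big-int multiplications are balanced and benefit from subquadratic multiplication.
import Mathlib
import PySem

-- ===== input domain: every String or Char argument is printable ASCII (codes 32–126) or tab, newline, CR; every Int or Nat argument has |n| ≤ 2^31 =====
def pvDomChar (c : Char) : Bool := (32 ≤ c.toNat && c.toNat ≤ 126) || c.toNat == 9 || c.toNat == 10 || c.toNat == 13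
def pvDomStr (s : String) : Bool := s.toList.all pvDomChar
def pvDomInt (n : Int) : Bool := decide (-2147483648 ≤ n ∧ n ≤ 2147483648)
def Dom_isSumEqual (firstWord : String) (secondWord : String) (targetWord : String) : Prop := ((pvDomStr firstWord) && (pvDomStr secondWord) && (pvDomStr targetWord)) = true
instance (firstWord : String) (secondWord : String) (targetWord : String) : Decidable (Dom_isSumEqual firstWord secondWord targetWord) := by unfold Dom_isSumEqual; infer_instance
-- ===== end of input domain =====

-- ===== PORT A =====
-- value(s): Horner accumulation out = out*10 + (ord ch - ord 'a')
def pvValueA (s : String) : Int :=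
  s.toList.foldl (fun out ch => out * 10 + ((ch.toNat : Int) - 97)) 0

def isSumEqual (firstWord : String) (secondWord : String) (targetWord : String) : Bool :=
  pvValueA firstWord + pvValueA secondWord == pvValueA targetWord

-- ===== PORT B =====
-- B: value(s) built by divide and conquer: value(s) = value(s[:k]) * 10^(n-k) + value(s[k:]), k = n // 2
def pvValueBList : List Char → Int
  | [] => 0
  | [c] => (c.toNat : Int) - 97
  | a :: b :: t =>
      pvValueBList ((a :: b :: t).take ((a :: b :: t).length / 2))
          * 10 ^ ((a :: b :: t).length - (a :: b :: t).length / 2)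
        + pvValueBList ((a :: b :: t).drop ((a :: b :: t).length / 2))
termination_by l => l.length
decreasing_by
  · simp [List.length_take]; omega
  · simp; omega

def pvValueB (s : String) : Int := pvValueBList s.toList

def isSumEqual_alt (firstWord : String) (secondWord : String) (targetWord : String) : Bool :=
  pvValueB firstWord + pvValueB secondWord == pvValueB targetWord

-- ===== PRECONDITION & SPEC =====
def Spec_isSumEqual (firstWord : String) (secondWord : String) (targetWord : String) (out : Bool) : Prop := out = isSumEqual_alt firstWord secondWord targetWord
instance (firstWord : String) (secondWord : String) (targetWord : String) (out : Bool) : Decidable (Spec_isSumEqual firstWord secondWord targetWord out) := by unfold Spec_isSumEqual; infer_instance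

-- ===== CLAIM (what is proved, stated in full; the proofs are below) =====
def Claim_equal_isSumEqual : Prop := ∀ (firstWord : String) (secondWord : String) (targetWord : String), Dom_isSumEqual firstWord secondWord targetWord → Spec_isSumEqual firstWord secondWord targetWord (isSumEqual firstWord secondWord targetWord)

-- ===== LEMMAS AND PROOFS =====

-- ===== VERDICT (by name: the statement is the Claim_ definition above) =====
theorem pvHorner_acc (l : List Char) : ∀ acc : Int,
    l.foldl (fun out ch => out * 10 + ((ch.toNat : Int) - 97)) acc
      = acc * 10 ^ l.length + l.foldl (fun out ch => out * 10 + ((ch.toNat : Int) - 97)) 0 := by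
  induction l with
  | nil => intro acc; simp
  | cons c t ih =>
      intro acc
      simp only [List.foldl_cons, List.length_cons]
      rw [ih (acc * 10 + _), ih (0 * 10 + _)]
      ring

theorem pvHorner_append (l1 l2 : List Char) :
    (l1 ++ l2).foldl (fun out ch => out * 10 + ((ch.toNat : Int) - 97)) 0
      = l1.foldl (fun out ch => out * 10 + ((ch.toNat : Int) - 97)) 0 * 10 ^ l2.length
        + l2.foldl (fun out ch => out * 10 + ((ch.toNat : Int) - 97)) 0 := by
  rw [List.foldl_append, pvHorner_acc]

theorem pvDC (l : List Char) :
    pvValueBList l = l.foldl (fun out ch => out * 10 + ((ch.toNat : Int) - 97)) 0 := by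
  induction l using pvValueBList.induct with
  | case1 => simp [pvValueBList]
  | case2 c => simp [pvValueBList]
  | case3 a b t ih1 ih2 =>
      rw [pvValueBList, ih1, ih2]
      conv_rhs => rw [← List.take_append_drop ((a :: b :: t).length / 2) (a :: b :: t)]
      rw [pvHorner_append]
      congr 2
      simp

theorem pvValue_eq (s : String) : pvValueA s = pvValueB s := by
  simp only [pvValueA, pvValueB, pvDC]

theorem isSumEqual_spec : Claim_equal_isSumEqual := by
  intro f s t _
  unfold Spec_isSumEqual isSumEqual isSumEqual_alt
  rw [pvValue_eq, pvValue_eq, pvValue_eq]
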